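-- pv_equiv track=rewrite | github.com/skynette/gft-v1.1 | server/helpers/utils.py | build_social_media_urls
-- ===== SOURCE A (Python) =====
-- def build_social_media_urls(usernames):
--     """Build social media URLs from a dictionary of usernames."""
--     base_urls = {
--         'twitter_url': 'https://x.com/',
--         'instagram_url': 'https://www.instagram.com/',
--         'youtube_url': 'https://www.youtube.com/user/',
--         'facebook_url': 'https://www.facebook.com/',
--         'snapchat_url': 'https://www.snapchat.com/add/',
--     }
--
--     result = {}
--     for platform, username in usernames.items():
--         if platform in base_urls and username:
--             result[platform] = f"{base_urls[platform]}{username}"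
--
--     return result
-- ===== SOURCE B (Python) =====
-- _BASE_URLS = {
--     'twitter_url': 'https://x.com/',
--     'instagram_url': 'https://www.instagram.com/',
--     'youtube_url': 'https://www.youtube.com/user/',
--     'facebook_url': 'https://www.facebook.com/',
--     'snapchat_url': 'https://www.snapchat.com/add/',
-- }
--
--
-- def build_social_media_urls(usernames):
--     """Build social media URLs from a dictionary of usernames."""
--     return _build(list(usernames.items()))
--
--
-- def _build(items):
--     """Recursively assemble the URL dict from a list of (platform, username) pairs."""
--     if not items:
--         return {}
--     (platform, username), rest = items[0], items[1:]
--     tail = _build(rest)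
--     base = _BASE_URLS.get(platform)
--     if base and username:
--         return {platform: base + username, **tail}
--     return tail
-- ===== Notes on version B (the rewrite author's own statement) =====
-- stated objective: alternative
-- what changed: B replaces A's imperative loop-with-accumulator by structural recursion: each call handles one (platform, username) pair, looks the prefix up once with .get, and merges a singleton dict with the recursively built tail; Pre_ excludes association lists with duplicate keys, which do not arise from a Python dict argument.
import Mathlib
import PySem

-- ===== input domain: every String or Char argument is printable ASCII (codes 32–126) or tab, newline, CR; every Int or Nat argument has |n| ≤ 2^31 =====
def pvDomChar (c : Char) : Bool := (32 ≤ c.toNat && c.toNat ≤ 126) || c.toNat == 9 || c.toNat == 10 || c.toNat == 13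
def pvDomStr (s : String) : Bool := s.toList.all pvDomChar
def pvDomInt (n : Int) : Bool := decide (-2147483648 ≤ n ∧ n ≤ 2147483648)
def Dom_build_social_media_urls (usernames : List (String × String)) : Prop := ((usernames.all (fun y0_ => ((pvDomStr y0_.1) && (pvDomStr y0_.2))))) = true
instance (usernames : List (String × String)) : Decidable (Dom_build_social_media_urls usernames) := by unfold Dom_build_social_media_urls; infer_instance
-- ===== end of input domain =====

-- B replaces A's imperative loop-with-accumulator by structural recursion: each call handles
-- one pair, fetches the prefix once with .get, and merges a singleton dict with the tail;
-- alternative decomposition, not faster.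

-- ===== PORT A =====
def pvBaseA : PySem.Dict String String :=
  PySem.Dict.ofList
    [("twitter_url", "https://x.com/"),
     ("instagram_url", "https://www.instagram.com/"),
     ("youtube_url", "https://www.youtube.com/user/"),
     ("facebook_url", "https://www.facebook.com/"),
     ("snapchat_url", "https://www.snapchat.com/add/")]

def build_social_media_urls (usernames : List (String × String)) : List (String × String) :=
  (usernames.foldl
    (fun result pu =>
      if pvBaseA.contains pu.1 && !(pu.2 == "") then
        result.insert pu.1 ((pvBaseA.getD pu.1 "") ++ pu.2)
      else result)
    PySem.Dict.empty).items

-- ===== PORT B =====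
def pvBaseB : PySem.Dict String String :=
  PySem.Dict.ofList
    [("twitter_url", "https://x.com/"),
     ("instagram_url", "https://www.instagram.com/"),
     ("youtube_url", "https://www.youtube.com/user/"),
     ("facebook_url", "https://www.facebook.com/"),
     ("snapchat_url", "https://www.snapchat.com/add/")]

-- '_build(items)': recursion on the item list; '{platform: base + username, **tail}'
-- is the singleton dict updated with tail's items.
def pvBuildRec : List (String × String) → PySem.Dict String String
  | [] => PySem.Dict.empty
  | (platform, username) :: rest =>
    let tail := pvBuildRec rest
    match pvBaseB.get? platform with
    | some base =>
      if username == "" then tail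
      else (PySem.Dict.ofList [(platform, base ++ username)]).update tail.items
    | none => tail

def build_social_media_urls_alt (usernames : List (String × String)) : List (String × String) :=
  (pvBuildRec usernames).items

-- ===== PRECONDITION & SPEC =====
-- Pre_ excludes association lists with duplicate keys: those do not represent a Python dict
-- (dict construction collapses duplicates before either program runs), so behaviour on them
-- is not defined by A's code.
def Pre_build_social_media_urls (usernames : List (String × String)) : Prop :=
  (usernames.map Prod.fst).Nodup
instance (usernames : List (String × String)) : Decidable (Pre_build_social_media_urls usernames) := by unfold Pre_build_social_media_urls; infer_instance

def pvWitness_build_social_media_urls : (List (String × String)) :=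
  [("twitter_url", "alice"), ("github_url", "bob"), ("instagram_url", "")]

def Spec_build_social_media_urls (usernames : List (String × String)) (out : List (String × String)) : Prop := out = build_social_media_urls_alt usernames
instance (usernames : List (String × String)) (out : List (String × String)) : Decidable (Spec_build_social_media_urls usernames out) := by unfold Spec_build_social_media_urls; infer_instance

-- ===== CLAIM (what is proved, stated in full; the proofs are below) =====
def Claim_equal_build_social_media_urls : Prop := ∀ (usernames : List (String × String)), Dom_build_social_media_urls usernames → Pre_build_social_media_urls usernames → Spec_build_social_media_urls usernames (build_social_media_urls usernames)

-- ===== LEMMAS AND PROOFS =====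

-- canonical description of the result shared by both proofs
def pvEntry (pu : String × String) : Option (String × String) :=
  match pvBaseA.get? pu.1 with
  | none => none
  | some prefix_ => if pu.2 == "" then none else some (pu.1, prefix_ ++ pu.2)

def pvC (l : List (String × String)) : List (String × String) := l.filterMap pvEntry

theorem pvEntry_fst (pu q : String × String) (h : pvEntry pu = some q) : q.1 = pu.1 := by
  unfold pvEntry at h
  cases hg : pvBaseA.get? pu.1 with
  | none => simp [hg] at h
  | some pre =>
    rw [hg] at h
    by_cases he : pu.2 == ""
    · simp [he] at h
    · simp [he] at h; simp [← h]

theorem pvC_fst_sublist (l : List (String × String)) :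
    ((pvC l).map Prod.fst).Sublist (l.map Prod.fst) := by
  induction l with
  | nil => simp [pvC]
  | cons h t ih =>
    simp only [pvC, List.filterMap_cons] at *
    cases he : pvEntry h with
    | none => simpa using ih.cons h.1
    | some q =>
      have hq := pvEntry_fst h q he
      simpa [hq] using ih.cons₂ q.1

theorem pv_foldA (l : List (String × String)) (d : PySem.Dict String String)
    (hd : d.keys.Nodup) (hl : (l.map Prod.fst).Nodup)
    (hdisj : ∀ k ∈ l.map Prod.fst, d.contains k = false) :
    (l.foldl
      (fun result pu =>
        if pvBaseA.contains pu.1 && !(pu.2 == "") then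
          result.insert pu.1 ((pvBaseA.getD pu.1 "") ++ pu.2)
        else result) d).items = d.items ++ pvC l := by
  induction l generalizing d with
  | nil => simp [pvC]
  | cons hd1 t ih =>
    obtain ⟨p, u⟩ := hd1
    simp only [List.map_cons, List.nodup_cons] at hl
    have hdt : ∀ k ∈ t.map Prod.fst, d.contains k = false := fun k hk =>
      hdisj k (by simp [hk])
    have hdp : d.contains p = false := hdisj p (by simp)
    simp only [List.foldl_cons]
    cases hg : pvBaseA.get? p with
    | none =>
      have hc : pvBaseA.contains p = false := by
        rw [PySem.Dict.contains_eq_isSome_get?, hg]; rfl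
      have hent : pvEntry (p, u) = none := by unfold pvEntry; rw [hg]
      rw [if_neg (by simp [hc]), ih d hd hl.2 hdt]
      simp [pvC, hent]
    | some pre =>
      have hc : pvBaseA.contains p = true := by
        rw [PySem.Dict.contains_eq_isSome_get?, hg]; rfl
      by_cases hu : u = ""
      · have hent : pvEntry (p, u) = none := by unfold pvEntry; rw [hg]; simp [hu]
        rw [if_neg (by simp [hu]), ih d hd hl.2 hdt]
        simp [pvC, hent]
      · have hgd : pvBaseA.getD p "" = pre := PySem.Dict.getD_of_get?_eq_some pvBaseA "" hg
        have hent : pvEntry (p, u) = some (p, pre ++ u) := by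
          unfold pvEntry; rw [hg]; simp [hu]
        rw [if_pos (by simp [hc, hu]), hgd]
        have hd' : (d.insert p (pre ++ u)).keys.Nodup := PySem.Dict.nodup_keys_insert d p _ hd
        have hdt' : ∀ k ∈ t.map Prod.fst, (d.insert p (pre ++ u)).contains k = false := by
          intro k hk
          rw [PySem.Dict.contains_insert]
          have hkp : k ≠ p := fun h => hl.1 (h ▸ hk)
          simp [hkp, hdt k hk]
        rw [ih _ hd' hl.2 hdt']
        rw [PySem.Dict.items_insert_of_not_contains d _ hdp]
        simp [pvC, hent]

-- the recursive builder produces exactly the canonical list when keys are distinct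
theorem pv_buildRec_items (l : List (String × String)) (hl : (l.map Prod.fst).Nodup) :
    (pvBuildRec l).items = pvC l := by
  induction l with
  | nil => rfl
  | cons hd1 t ih =>
    obtain ⟨p, u⟩ := hd1
    simp only [List.map_cons, List.nodup_cons] at hl
    have htail : (pvBuildRec t).items = pvC t := ih hl.2
    have hCnodup : ((pvC t).map Prod.fst).Nodup := (pvC_fst_sublist t).nodup hl.2
    unfold pvBuildRec
    show (match pvBaseB.get? p with
      | some base =>
        if u == "" then pvBuildRec t
        else (PySem.Dict.ofList [(p, base ++ u)]).update (pvBuildRec t).items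
      | none => pvBuildRec t).items = pvC ((p, u) :: t)
    cases hg : pvBaseB.get? p with
    | none =>
      have hent : pvEntry (p, u) = none := by unfold pvEntry; rw [show pvBaseA = pvBaseB from rfl, hg]
      simpa [pvC, hent] using htail
    | some base =>
      by_cases hu : u = ""
      · subst hu
        have hent : pvEntry (p, "") = none := by
          unfold pvEntry; rw [show pvBaseA = pvBaseB from rfl, hg]; simp
        simpa [pvC, hent] using htail
      · have hent : pvEntry (p, u) = some (p, base ++ u) := by
          unfold pvEntry; rw [show pvBaseA = pvBaseB from rfl, hg]; simp [hu]
        simp only [if_neg (by simp [hu] : ¬(u == "") = true)]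
        have hsing : (PySem.Dict.ofList [(p, base ++ u)]).items = [(p, base ++ u)] := rfl
        have hfresh : ∀ a ∈ (pvBuildRec t).items,
            (PySem.Dict.ofList [(p, base ++ u)]).contains a.1 = false := by
          intro a ha
          rw [htail] at ha
          have hap : a.1 ≠ p := by
            intro h
            exact hl.1 (h ▸ ((pvC_fst_sublist t).subset (List.mem_map_of_mem ha)))
          simp [PySem.Dict.ofList, PySem.Dict.update, PySem.Dict.contains_insert, hap]
        have hnd : ((pvBuildRec t).items.map Prod.fst).Nodup := by rw [htail]; exact hCnodup
        unfold PySem.Dict.update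
        rw [show ((pvBuildRec t).items.foldl (fun d kv => d.insert kv.1 kv.2)
              (PySem.Dict.ofList [(p, base ++ u)])) =
            ((pvBuildRec t).items.foldl (fun d a => d.insert (Prod.fst a) (Prod.snd a))
              (PySem.Dict.ofList [(p, base ++ u)])) from rfl,
          PySem.Dict.items_foldl_insert_fresh _ _ _ _ hfresh hnd, hsing, htail]
        simp [pvC, hent]

-- ===== VERDICT (by name: the statement is the Claim_ definition above) =====
theorem build_social_media_urls_spec : Claim_equal_build_social_media_urls := by
  intro usernames _ hpre
  unfold Spec_build_social_media_urls build_social_media_urls build_social_media_urls_alt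
  rw [pv_buildRec_items usernames hpre,
    pv_foldA usernames PySem.Dict.empty PySem.Dict.nodup_keys_empty hpre
      (fun k _ => PySem.Dict.contains_empty k)]
  rfl
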